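-- pv_equiv track=rewrite | github.com/d-shishir/Baghchal-Royale | backend/app/ai/double_q_learning.py | _count_line_formations
-- ===== SOURCE A (Python) =====
-- from typing import Dict, List, Tuple, Optional, Any
--
-- def _count_line_formations(goat_positions: List[Tuple]) -> int:
--     """Count linear formations of 3+ goats."""
--     if len(goat_positions) < 3:
--         return 0
--
--     formations = 0
--     directions = [(0, 1), (1, 0), (1, 1), (1, -1)]  # horizontal, vertical, diagonals
--
--     for direction in directions:
--         # Check each possible starting position
--         for start_pos in goat_positions:
--             line_length = 1
--             current_pos = start_pos
--
--             # Count consecutive goats in this direction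
--             while True:
--                 next_pos = (current_pos[0] + direction[0], current_pos[1] + direction[1])
--                 if next_pos in goat_positions:
--                     line_length += 1
--                     current_pos = next_pos
--                 else:
--                     break
--
--             if line_length >= 3:
--                 formations += 1
--
--     return formations
-- ===== SOURCE B (Python) =====
-- from typing import List, Tuple
--
-- def _count_line_formations(goat_positions: List[Tuple]) -> int:
--     """Count linear formations of 3+ goats."""
--     if len(goat_positions) < 3:
--         return 0
--     occupied = set(goat_positions)
--     total = 0
--     for dx, dy in ((0, 1), (1, 0), (1, 1), (1, -1)):
--         for x, y in goat_positions:
--             if (x + dx, y + dy) in occupied and (x + 2 * dx, y + 2 * dy) in occupied: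
--                 total += 1
--     return total
-- ===== Notes on version B (the rewrite author's own statement) =====
-- stated objective: faster
-- what changed: Replaces the unbounded while-loop run-length scan (with O(n) list membership inside) per start position with a set built once and a fixed O(1) two-cell membership test, using that run length >= 3 iff the next two cells in the direction are occupied.
import Mathlib
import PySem

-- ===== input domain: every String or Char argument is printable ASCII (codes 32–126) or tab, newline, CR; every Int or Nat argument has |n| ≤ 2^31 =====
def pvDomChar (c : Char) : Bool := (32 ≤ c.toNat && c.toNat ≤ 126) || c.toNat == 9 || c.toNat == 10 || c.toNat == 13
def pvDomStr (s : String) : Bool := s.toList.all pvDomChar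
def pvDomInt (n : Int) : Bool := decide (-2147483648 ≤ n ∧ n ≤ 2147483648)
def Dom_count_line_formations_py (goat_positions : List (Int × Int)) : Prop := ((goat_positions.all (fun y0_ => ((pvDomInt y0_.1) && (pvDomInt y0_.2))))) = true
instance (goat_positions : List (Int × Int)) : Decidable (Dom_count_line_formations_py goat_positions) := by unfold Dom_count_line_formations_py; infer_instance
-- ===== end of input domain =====

-- B replaces A's unbounded while-loop run-length scan with one set built once and a
-- two-cell membership test per (direction, start) pair: simpler, no inner scan.

-- ===== PORT A =====
-- Python's while loop scans along the direction; it always terminates because each step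
-- visits a fresh position of the list, so at most goat_positions.length successful steps
-- can occur: fuel = goat_positions.length is exact (a totality guard, not an algorithm change).
def pvScanA (L : List (Int × Int)) (d : Int × Int) : Nat → (Int × Int) → Int → Int
  | 0, _, n => n
  | f + 1, cur, n =>
      let next : Int × Int := (cur.1 + d.1, cur.2 + d.2)
      if next ∈ L then pvScanA L d f next (n + 1) else n

def count_line_formations_py (goat_positions : List (Int × Int)) : Int :=
  if goat_positions.length < 3 then 0
  else
    ([((0:Int), (1:Int)), (1, 0), (1, 1), (1, -1)]).foldl
      (fun acc direction =>
        goat_positions.foldl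
          (fun acc start_pos =>
            let line_length := pvScanA goat_positions direction goat_positions.length start_pos 1
            if 3 ≤ line_length then acc + 1 else acc)
          acc)
      0

-- ===== PORT B =====
def count_line_formations_py_alt (goat_positions : List (Int × Int)) : Int :=
  if goat_positions.length < 3 then 0
  else
    let occupied : PySem.Set (Int × Int) := PySem.Set.ofList goat_positions
    ([((0:Int), (1:Int)), (1, 0), (1, 1), (1, -1)]).foldl
      (fun acc d =>
        goat_positions.foldl
          (fun acc p =>
            if (p.1 + d.1, p.2 + d.2) ∈ occupied ∧ (p.1 + 2 * d.1, p.2 + 2 * d.2) ∈ occupied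
            then acc + 1 else acc)
          acc)
      0

-- ===== PRECONDITION & SPEC =====
def Spec_count_line_formations_py (goat_positions : List (Int × Int)) (out : Int) : Prop := out = count_line_formations_py_alt goat_positions
instance (goat_positions : List (Int × Int)) (out : Int) : Decidable (Spec_count_line_formations_py goat_positions out) := by unfold Spec_count_line_formations_py; infer_instance

-- ===== CLAIM (what is proved, stated in full; the proofs are below) =====
def Claim_equal_count_line_formations_py : Prop := ∀ (goat_positions : List (Int × Int)), Dom_count_line_formations_py goat_positions → Spec_count_line_formations_py goat_positions (count_line_formations_py goat_positions)

-- ===== LEMMAS AND PROOFS =====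

-- The scan's result never drops below its accumulator.
theorem pvScanA_ge (L : List (Int × Int)) (d : Int × Int) :
    ∀ (f : Nat) (cur : Int × Int) (n : Int), n ≤ pvScanA L d f cur n := by
  intro f
  induction f with
  | zero => intro cur n; simp [pvScanA]
  | succ f ih =>
      intro cur n
      simp only [pvScanA]
      split
      · exact le_trans (by omega) (ih _ (n + 1))
      · exact le_refl n

-- Run length ≥ 3 iff the next two cells along the direction are in the list (fuel ≥ 2 suffices).
theorem pvScanA_ge_three_iff (L : List (Int × Int)) (d : Int × Int) (f : Nat) (hf : 2 ≤ f)
    (p : Int × Int) :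
    (3 ≤ pvScanA L d f p 1) ↔
      ((p.1 + d.1, p.2 + d.2) ∈ L ∧ (p.1 + 2 * d.1, p.2 + 2 * d.2) ∈ L) := by
  obtain ⟨f', rfl⟩ : ∃ f', f = f' + 2 := ⟨f - 2, by omega⟩
  simp only [pvScanA]
  by_cases h1 : (p.1 + d.1, p.2 + d.2) ∈ L
  · simp only [h1, if_pos]
    have h2eq : (p.1 + d.1 + d.1, p.2 + d.2 + d.2) = (p.1 + 2 * d.1, p.2 + 2 * d.2) := by
      simp only [Prod.mk.injEq]; constructor <;> ring
    rw [h2eq]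
    by_cases h2 : (p.1 + 2 * d.1, p.2 + 2 * d.2) ∈ L
    · simp only [h2, if_pos, true_and]
      constructor
      · intro _; trivial
      · intro _
        exact le_trans (by norm_num) (pvScanA_ge L d f' _ 3)
    · simp [h2]
  · simp [h1]

-- The two per-start-position counting steps agree.
theorem pvStep_eq (L : List (Int × Int)) (hL : ¬ L.length < 3) (d : Int × Int) :
    (fun (acc : Int) (p : Int × Int) =>
        if 3 ≤ pvScanA L d L.length p 1 then acc + 1 else acc)
    = (fun (acc : Int) (p : Int × Int) =>
        if (p.1 + d.1, p.2 + d.2) ∈ PySem.Set.ofList L ∧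
           (p.1 + 2 * d.1, p.2 + 2 * d.2) ∈ PySem.Set.ofList L
        then acc + 1 else acc) := by
  funext acc p
  have h := pvScanA_ge_three_iff L d L.length (by omega) p
  simp only [PySem.Set.mem_ofList]
  split_ifs with h1 h2 <;> simp_all

theorem count_line_formations_py_spec : Claim_equal_count_line_formations_py := by
  intro L _
  unfold Spec_count_line_formations_py count_line_formations_py count_line_formations_py_alt
  by_cases h : L.length < 3
  · simp [h]
  · simp only [h, if_neg, not_false_iff]
    congr 1
    funext acc d
    rw [pvStep_eq L h d]
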